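-- pv_equiv track=rewrite | github.com/wyb-coder/LLM_First | spring-main/sjx/check.py | compare_triples
-- ===== SOURCE A (Python) =====
-- from typing import Dict, Iterable, List, Tuple
--
-- def compare_triples(
-- 	expected: Dict[int, List[str]],
-- 	observed: Dict[int, List[str]],
-- 	total_rows: int,
-- 	max_report: int,
-- ) -> Tuple[int, List[Tuple[int, List[str], List[str]]]]:
-- 	mismatches: List[Tuple[int, List[str], List[str]]] = []
-- 	mismatch_count = 0
-- 	for essay_id in range(total_rows):
-- 		exp = expected.get(essay_id, [])
-- 		obs = observed.get(essay_id, [])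
-- 		if exp != obs:
-- 			mismatch_count += 1
-- 			if len(mismatches) < max_report:
-- 				mismatches.append((essay_id, exp, obs))
-- 	return mismatch_count, mismatches
-- ===== SOURCE B (Python) =====
-- def compare_triples(expected, observed, total_rows, max_report):
--     keys = sorted(set(expected) | set(observed))
--     diffs = [(k, expected.get(k, []), observed.get(k, []))
--              for k in keys
--              if 0 <= k < total_rows and expected.get(k, []) != observed.get(k, [])]
--     return len(diffs), diffs[:max(max_report, 0)]
-- ===== Notes on version B (the rewrite author's own statement) =====
-- stated objective: alternative
-- what changed: B is a staged pipeline instead of A's single counting loop: it builds the full list of mismatching triples via one comprehension over the sorted union of the dicts' keys restricted to [0, total_rows) (ids absent from both dicts can never mismatch), then returns its length and a slice of its first max_report entries; cost is O(K log K) in the number of keys rather than O(total_rows), a trade that wins only when the dicts are sparse relative to total_rows.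
import Mathlib
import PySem

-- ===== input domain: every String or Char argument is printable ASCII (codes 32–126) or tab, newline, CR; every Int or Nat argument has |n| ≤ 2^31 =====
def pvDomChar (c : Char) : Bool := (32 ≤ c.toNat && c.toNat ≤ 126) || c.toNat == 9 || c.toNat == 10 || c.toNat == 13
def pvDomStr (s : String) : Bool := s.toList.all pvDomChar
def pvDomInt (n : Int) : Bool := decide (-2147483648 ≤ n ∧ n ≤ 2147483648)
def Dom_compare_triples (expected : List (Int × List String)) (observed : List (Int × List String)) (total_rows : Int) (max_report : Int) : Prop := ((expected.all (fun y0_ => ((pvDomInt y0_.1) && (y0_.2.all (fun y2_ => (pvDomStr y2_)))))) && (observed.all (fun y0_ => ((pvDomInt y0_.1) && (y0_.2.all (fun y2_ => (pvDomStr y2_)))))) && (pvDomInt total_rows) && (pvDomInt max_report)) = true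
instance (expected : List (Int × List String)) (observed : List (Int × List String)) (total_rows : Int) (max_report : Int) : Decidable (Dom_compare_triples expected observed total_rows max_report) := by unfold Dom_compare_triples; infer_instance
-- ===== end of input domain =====

-- B replaces A's single counting loop over range(total_rows) by a staged pipeline:
-- collect every mismatching triple over the sorted union of the dicts' keys within
-- [0, total_rows), then take the length and the first-max_report slice.

-- ===== PORT A =====
def compare_triples (expected : List (Int × List String)) (observed : List (Int × List String)) (total_rows : Int) (max_report : Int) : Int × (List (Int × List String × List String)) :=
  (PySem.List.pyRange 0 total_rows 1).foldl
    (fun (acc : Int × List (Int × List String × List String)) essay_id =>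
      let exp := (List.lookup essay_id expected).getD []
      let obs := (List.lookup essay_id observed).getD []
      if exp ≠ obs then
        (acc.1 + 1,
         if (acc.2.length : Int) < max_report then acc.2 ++ [(essay_id, exp, obs)] else acc.2)
      else acc)
    (0, [])

-- ===== PORT B =====
def compare_triples_alt (expected : List (Int × List String)) (observed : List (Int × List String)) (total_rows : Int) (max_report : Int) : Int × (List (Int × List String × List String)) :=
  let keys := PySem.List.sorted
      (PySem.Set.union (PySem.Set.ofList (expected.map (·.1))) (observed.map (·.1)))
      (fun x => x) false
  let diffs := keys.filterMap (fun k =>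
      if 0 ≤ k ∧ k < total_rows ∧
          (List.lookup k expected).getD [] ≠ (List.lookup k observed).getD [] then
        some (k, (List.lookup k expected).getD [], (List.lookup k observed).getD [])
      else none)
  ((diffs.length : Int), diffs.take (max max_report 0).toNat)

-- ===== PRECONDITION & SPEC =====
def Spec_compare_triples (expected : List (Int × List String)) (observed : List (Int × List String)) (total_rows : Int) (max_report : Int) (out : Int × (List (Int × List String × List String))) : Prop := out = compare_triples_alt expected observed total_rows max_report
instance (expected : List (Int × List String)) (observed : List (Int × List String)) (total_rows : Int) (max_report : Int) (out : Int × (List (Int × List String × List String))) : Decidable (Spec_compare_triples expected observed total_rows max_report out) := by unfold Spec_compare_triples; infer_instance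

-- ===== CLAIM (what is proved, stated in full; the proofs are below) =====
def Claim_equal_compare_triples : Prop := ∀ (expected : List (Int × List String)) (observed : List (Int × List String)) (total_rows : Int) (max_report : Int), Dom_compare_triples expected observed total_rows max_report → Spec_compare_triples expected observed total_rows max_report (compare_triples expected observed total_rows max_report)

-- ===== LEMMAS AND PROOFS =====

-- keys not present in an association list look up to none
theorem lookup_eq_none_of_not_mem_fst {α β : Type} [BEq α] [LawfulBEq α]
    (l : List (α × β)) (a : α) (h : a ∉ l.map Prod.fst) : List.lookup a l = none := by
  induction l with
  | nil => rfl
  | cons p t ih =>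
    simp only [List.map_cons, List.mem_cons] at h
    push Not at h
    have hb : (a == p.1) = false := beq_eq_false_iff_ne.mpr h.1
    simp [List.lookup, hb, ih h.2]

-- a fold over l equals the fold over the elements satisfying p, when the others are no-ops
theorem foldl_eq_foldl_filter_of_skip {α β : Type} (f : β → α → β) (p : α → Prop)
    [DecidablePred p] (l : List α) (init : β)
    (h : ∀ acc x, x ∈ l → ¬ p x → f acc x = acc) :
    l.foldl f init = (l.filter (fun x => decide (p x))).foldl f init := by
  rw [← PySem.List.foldl_ite_eq_foldl_filter]
  apply PySem.List.foldl_congr_mem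
  intro acc x hx
  by_cases hp : p x
  · simp [hp]
  · simp [hp, h acc x hx hp]

-- an if-then-some comprehension is a filter followed by a map
theorem filterMap_ite_eq_map_filter {α β : Type} (q : α → Prop) [DecidablePred q]
    (f : α → β) (l : List α) :
    l.filterMap (fun x => if q x then some (f x) else none)
      = (l.filter (fun x => decide (q x))).map f := by
  induction l with
  | nil => rfl
  | cons a t ih => by_cases h : q a <;> simp [h, ih]

-- two strictly increasing lists with the same members are equal
theorem eq_of_pairwise_lt_of_mem_iff (l₁ l₂ : List Int)
    (h1 : l₁.Pairwise (· < ·)) (h2 : l₂.Pairwise (· < ·))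
    (hmem : ∀ x, x ∈ l₁ ↔ x ∈ l₂) : l₁ = l₂ := by
  have hperm := (List.perm_ext_iff_of_nodup
      (h1.imp fun hlt => ne_of_lt hlt) (h2.imp fun hlt => ne_of_lt hlt)).mpr hmem
  calc l₁ = PySem.List.sorted l₁ (fun x => x) false :=
        (PySem.List.sorted_eq_self_of_pairwise _ _ (h1.imp fun h => le_of_lt h)).symm
    _ = l₂ := PySem.List.sorted_eq_of_perm_of_pairwise_lt _ _ _ hperm.symm h2

-- A's loop over a list of all-mismatching ids, characterised in closed form
theorem foldl_mismatch_closed (expected : List (Int × List String))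
    (observed : List (Int × List String)) (max_report : Int)
    (L : List Int) (c : Int) (acc : List (Int × List String × List String))
    (hall : ∀ x ∈ L, (List.lookup x expected).getD [] ≠ (List.lookup x observed).getD []) :
    L.foldl
      (fun (acc : Int × List (Int × List String × List String)) essay_id =>
        let exp := (List.lookup essay_id expected).getD []
        let obs := (List.lookup essay_id observed).getD []
        if exp ≠ obs then
          (acc.1 + 1,
           if (acc.2.length : Int) < max_report then acc.2 ++ [(essay_id, exp, obs)] else acc.2)
        else acc)
      (c, acc)
    = (c + L.length,
       acc ++ (L.map (fun k => (k, (List.lookup k expected).getD [], (List.lookup k observed).getD []))).take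
         (max_report - acc.length).toNat) := by
  induction L generalizing c acc with
  | nil => simp
  | cons a t ih =>
    have ha := hall a (by simp)
    have ht : ∀ x ∈ t, (List.lookup x expected).getD [] ≠ (List.lookup x observed).getD [] :=
      fun x hx => hall x (List.mem_cons_of_mem _ hx)
    simp only [List.foldl_cons, if_pos ha]
    by_cases hlen : (acc.length : Int) < max_report
    · rw [if_pos hlen, ih _ _ ht]
      have htn : (max_report - acc.length).toNat
          = ((max_report - (acc.length + 1)).toNat) + 1 := by omega
      simp only [List.length_append, List.length_cons, List.length_nil, List.map_cons,
        Prod.mk.injEq]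
      rw [htn]
      simp only [List.take_succ_cons]
      refine ⟨by push_cast; ring, ?_⟩
      rw [List.append_assoc, List.singleton_append]
      have harg : (max_report - (((acc.length + (0 + 1) : Nat)) : Int)).toNat
          = (max_report - ((acc.length : Int) + 1)).toNat := by push_cast; omega
      rw [harg]
    · rw [if_neg hlen, ih _ _ ht]
      have h0 : (max_report - acc.length).toNat = 0 := by omega
      simp only [h0, List.take_zero, List.append_nil, List.length_cons, List.map_cons,
        Prod.mk.injEq]
      simp only [and_true]
      omega

-- ===== VERDICT (by name: the statement is the Claim_ definition above) =====
theorem compare_triples_spec : Claim_equal_compare_triples := by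
  intro expected observed total_rows max_report _
  unfold Spec_compare_triples
  simp only [compare_triples, compare_triples_alt]
  have hU : PySem.Set.union (PySem.Set.ofList (expected.map (·.1))) (observed.map (·.1))
      = PySem.Set.ofList (expected.map (·.1) ++ observed.map (·.1)) :=
    (PySem.Set.ofList_append _ _).symm
  rw [hU]
  set p : Int → Prop := fun k =>
    (List.lookup k expected).getD [] ≠ (List.lookup k observed).getD [] with hp
  have hpU : ∀ x, p x → x ∈ PySem.Set.ofList (expected.map (·.1) ++ observed.map (·.1)) := by
    intro x hx
    by_contra hmem
    simp only [PySem.Set.mem_ofList, List.mem_append] at hmem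
    push Not at hmem
    exact hx (by simp [lookup_eq_none_of_not_mem_fst expected x hmem.1,
      lookup_eq_none_of_not_mem_fst observed x hmem.2])
  -- A's fold skips ids with equal rows
  rw [foldl_eq_foldl_filter_of_skip _ p _ _
    (by intro acc x _ hx; simp only [hp] at hx; simp [if_neg hx])]
  -- the two filtered id lists coincide
  have hlists : (PySem.List.pyRange 0 total_rows 1).filter (fun x => decide (p x))
      = (PySem.List.sorted (PySem.Set.ofList (expected.map (·.1) ++ observed.map (·.1))) (fun x => x) false).filter
          (fun x => decide (0 ≤ x ∧ x < total_rows ∧ p x)) := by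
    apply eq_of_pairwise_lt_of_mem_iff
    · exact (PySem.List.pairwise_lt_pyRange_one 0 total_rows).filter _
    · exact (PySem.List.sorted_ofList_pairwise_lt _).filter _
    · intro x
      simp only [List.mem_filter, PySem.List.mem_pyRange_one, PySem.List.mem_sorted,
        decide_eq_true_eq]
      constructor
      · rintro ⟨⟨h0, h1⟩, hpx⟩; exact ⟨hpU x hpx, h0, h1, hpx⟩
      · rintro ⟨_, h0, h1, hpx⟩; exact ⟨⟨h0, h1⟩, hpx⟩
  rw [hlists]
  rw [filterMap_ite_eq_map_filter (fun k => 0 ≤ k ∧ k < total_rows ∧ p k)]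
  set M := (PySem.List.sorted (PySem.Set.ofList (expected.map (·.1) ++ observed.map (·.1))) (fun x => x) false).filter
      (fun x => decide (0 ≤ x ∧ x < total_rows ∧ p x)) with hM
  have hall : ∀ x ∈ M, (List.lookup x expected).getD [] ≠ (List.lookup x observed).getD [] := by
    intro x hx
    rw [hM, List.mem_filter] at hx
    have := hx.2
    simp only [decide_eq_true_eq] at this
    exact this.2.2
  rw [foldl_mismatch_closed expected observed max_report M 0 [] hall]
  simp only [List.nil_append, List.length_nil, Nat.cast_zero, Int.sub_zero, Int.zero_add]
  congr 1
  · simp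
  · congr 1; omega
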